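-- pv_equiv track=rewrite | github.com/akhandsingh17/assignments | codingexercise/PrintStringSpecChar.py | PrintStringSpecChar
-- ===== SOURCE A (Python) =====
-- def PrintStringSpecChar(str,chr,cnt):
--
--     tmp_cnt=0
--     for i in range(0,len(str)):
--         key=str[i]
--         if key==chr:
--             tmp_cnt=tmp_cnt+1
--
--             if tmp_cnt==cnt:
--                 return str[i+1:]
-- ===== SOURCE B (Python) =====
-- def PrintStringSpecChar(str, chr, cnt):
--     # Split on the separator and rejoin everything after the cnt-th piece.
--     if len(chr) != 1 or cnt < 1:
--         return None
--     parts = str.split(chr)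
--     if len(parts) - 1 < cnt:
--         return None
--     return chr.join(parts[cnt:])
-- ===== Notes on version B (the rewrite author's own statement) =====
-- stated objective: idiomatic
-- what changed: Replaces A's character-by-character index loop with an occurrence counter by str.split(chr) followed by chr.join(parts[cnt:]) when cnt >= 1 and at least cnt separators exist (None otherwise; empty or multi-char chr can never equal a single character, so B returns None there like A).
import Mathlib
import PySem

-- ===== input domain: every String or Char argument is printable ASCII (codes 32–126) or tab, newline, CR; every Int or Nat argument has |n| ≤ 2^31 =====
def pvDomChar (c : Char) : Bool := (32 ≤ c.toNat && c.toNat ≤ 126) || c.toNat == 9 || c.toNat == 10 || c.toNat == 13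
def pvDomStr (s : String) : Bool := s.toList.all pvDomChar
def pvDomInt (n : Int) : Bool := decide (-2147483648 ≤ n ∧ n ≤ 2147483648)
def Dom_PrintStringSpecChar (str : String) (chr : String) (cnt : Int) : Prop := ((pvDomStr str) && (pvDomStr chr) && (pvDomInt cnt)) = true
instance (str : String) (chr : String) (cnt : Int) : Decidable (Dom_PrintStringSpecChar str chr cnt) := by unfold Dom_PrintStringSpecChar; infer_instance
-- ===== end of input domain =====

-- B replaces A's index-scan with counter by a split-on-separator and rejoin of the
-- pieces after the cnt-th one (idiomatic; same cost).


-- ===== PORT A =====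
-- A's for-loop over the indices of `str` with counter tmp_cnt and early return str[i+1:]:
-- ported as the structural recursion over the character list (key = str[i]; the recursion
-- tail IS str[i+1:], exact since i+1 ≥ 0; key == chr is equality of the one-char string
-- with chr, exact); falling off the loop returns None.
def pvAGo (chr : String) (cnt : Int) : List Char → Int → Option (List Char)
  | [], _ => none
  | key :: rest, tmp_cnt =>
    if String.ofList [key] = chr then
      if tmp_cnt + 1 = cnt then some rest
      else pvAGo chr cnt rest (tmp_cnt + 1)
    else pvAGo chr cnt rest tmp_cnt

def PrintStringSpecChar (str : String) (chr : String) (cnt : Int) : Option String :=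
  (pvAGo chr cnt str.toList 0).map String.ofList

-- ===== PORT B =====
def PrintStringSpecChar_alt (str : String) (chr : String) (cnt : Int) : Option String :=
  if PySem.Str.len chr ≠ 1 ∨ cnt < 1 then none
  else
    match PySem.Str.split? str chr with
    | none => none   -- unreachable under the guard: split? is none only for chr = ""
    | some parts =>
      if (parts.length : Int) - 1 < cnt then none
      else some (PySem.Str.join chr (parts.drop cnt.toNat))  -- parts[cnt:] with cnt ≥ 1: drop, exact

-- ===== PRECONDITION & SPEC =====
def Spec_PrintStringSpecChar (str : String) (chr : String) (cnt : Int) (out : Option String) : Prop := out = PrintStringSpecChar_alt str chr cnt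
instance (str : String) (chr : String) (cnt : Int) (out : Option String) : Decidable (Spec_PrintStringSpecChar str chr cnt out) := by unfold Spec_PrintStringSpecChar; infer_instance

-- ===== CLAIM (what is proved, stated in full; the proofs are below) =====
def Claim_equal_PrintStringSpecChar : Prop := ∀ (str : String) (chr : String) (cnt : Int), Dom_PrintStringSpecChar str chr cnt → Spec_PrintStringSpecChar str chr cnt (PrintStringSpecChar str chr cnt)

-- ===== LEMMAS AND PROOFS =====

-- reference: the suffix after the n-th occurrence of c (n ≥ 1), none if fewer occurrences
def pvNth (c : Char) : List Char → Nat → Option (List Char)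
  | [], _ => none
  | x :: xs, n => if x = c then (if n = 1 then some xs else pvNth c xs (n - 1)) else pvNth c xs n

-- reference single-char split
def pvSplitRef (c : Char) : List Char → List (List Char)
  | [] => [[]]
  | x :: xs =>
    if x = c then [] :: pvSplitRef c xs
    else
      match pvSplitRef c xs with
      | [] => [[x]]
      | h :: t => (x :: h) :: t

theorem pvSplitRef_ne_nil (c : Char) (s : List Char) : pvSplitRef c s ≠ [] := by
  cases s with
  | nil => simp [pvSplitRef]
  | cons x xs =>
    simp only [pvSplitRef]
    split
    · simp
    · split <;> simp

theorem pvAGo_none_of_le (chr : String) (cnt : Int) (s : List Char) :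
    ∀ tmp : Int, cnt ≤ tmp → pvAGo chr cnt s tmp = none := by
  induction s with
  | nil => intro tmp h; rfl
  | cons x xs ih =>
    intro tmp h
    simp only [pvAGo]
    split
    · rw [if_neg (by omega)]; exact ih _ (by omega)
    · exact ih _ h

theorem pvAGo_none_of_len (chr : String) (cnt : Int) (s : List Char)
    (hlen : chr.toList.length ≠ 1) : ∀ tmp : Int, pvAGo chr cnt s tmp = none := by
  induction s with
  | nil => intro tmp; rfl
  | cons x xs ih =>
    intro tmp
    simp only [pvAGo]
    rw [if_neg]
    · exact ih tmp
    · intro h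
      apply hlen
      rw [← h]
      simp

theorem pvAGo_eq_pvNth (chr : String) (c : Char) (cnt : Int) (hc : chr.toList = [c])
    (s : List Char) : ∀ (tmp : Int) (n : Nat), 1 ≤ n → cnt = tmp + n →
    pvAGo chr cnt s tmp = pvNth c s n := by
  induction s with
  | nil => intro tmp n _ _; rfl
  | cons x xs ih =>
    intro tmp n hn hcnt
    have hkey : (String.ofList [x] = chr) ↔ (x = c) := by
      constructor
      · intro h
        have := congrArg String.toList h
        simp [hc] at this
        exact this
      · intro h; subst h
        apply String.toList_inj.mp
        simp [hc]
    simp only [pvAGo, pvNth]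
    by_cases hx : x = c
    · rw [if_pos (hkey.mpr hx), if_pos hx]
      by_cases h1 : n = 1
      · subst h1
        rw [if_pos (by omega), if_pos rfl]
      · rw [if_neg (by omega), if_neg h1]
        exact ih (tmp + 1) (n - 1) (by omega) (by omega)
    · rw [if_neg (fun h => hx (hkey.mp h)), if_neg hx]
      exact ih tmp n hn hcnt

theorem pvJoin_splitRef (c : Char) (s : List Char) :
    PySem.Chars.join [c] (pvSplitRef c s) = s := by
  induction s with
  | nil => simp [pvSplitRef, PySem.Chars.join_singleton]
  | cons x xs ih =>
    simp only [pvSplitRef]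
    by_cases hx : x = c
    · rw [if_pos hx]
      obtain ⟨h, t, ht⟩ : ∃ h t, pvSplitRef c xs = h :: t := by
        cases hs : pvSplitRef c xs with
        | nil => exact absurd hs (pvSplitRef_ne_nil c xs)
        | cons h t => exact ⟨h, t, rfl⟩
      rw [ht]
      rw [ht] at ih
      rw [PySem.Chars.join_cons_cons]
      simp [ih, hx]
    · rw [if_neg hx]
      cases hs : pvSplitRef c xs with
      | nil => exact absurd hs (pvSplitRef_ne_nil c xs)
      | cons h t =>
        rw [hs] at ih
        cases t with
        | nil =>
          rw [PySem.Chars.join_singleton]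
          rw [PySem.Chars.join_singleton] at ih
          simp [ih]
        | cons q r =>
          rw [PySem.Chars.join_cons_cons]
          rw [PySem.Chars.join_cons_cons] at ih
          simp only [List.cons_append, List.append_assoc] at ih ⊢
          rw [ih]

theorem pvSplitRef_length_pos (c : Char) (s : List Char) : 1 ≤ (pvSplitRef c s).length := by
  cases hs : pvSplitRef c s with
  | nil => exact absurd hs (pvSplitRef_ne_nil c s)
  | cons h t => simp

theorem pvBcore_eq_pvNth (c : Char) (s : List Char) : ∀ n : Nat, 1 ≤ n →
    (if ((pvSplitRef c s).length : Int) - 1 < (n : Int) then none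
     else some (PySem.Chars.join [c] ((pvSplitRef c s).drop n))) = pvNth c s n := by
  induction s with
  | nil =>
    intro n hn
    rw [if_pos]
    · rfl
    · simp [pvSplitRef]; omega
  | cons x xs ih =>
    intro n hn
    have hL := pvSplitRef_length_pos c xs
    by_cases hx : x = c
    · have hsr : pvSplitRef c (x :: xs) = [] :: pvSplitRef c xs := by
        simp [pvSplitRef, hx]
      rw [hsr]
      simp only [pvNth, if_pos hx]
      by_cases h1 : n = 1
      · subst h1
        rw [if_neg (by rw [List.length_cons]; push_cast; omega), if_pos rfl]
        simp only [List.drop_succ_cons, List.drop_zero]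
        rw [pvJoin_splitRef]
      · rw [if_neg h1]
        rw [← ih (n - 1) (by omega)]
        have hdrop : ([] :: pvSplitRef c xs).drop n = (pvSplitRef c xs).drop (n - 1) := by
          cases n with
          | zero => omega
          | succ m => simp
        rw [hdrop]
        by_cases hcond : ((pvSplitRef c xs).length : Int) - 1 < ((n - 1 : Nat) : Int)
        · rw [if_pos hcond, if_pos (by simp at hcond ⊢; omega)]
        · rw [if_neg hcond, if_neg (by simp at hcond ⊢; omega)]
    · obtain ⟨h, t, hs⟩ : ∃ h t, pvSplitRef c xs = h :: t := by
        cases hs : pvSplitRef c xs with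
        | nil => exact absurd hs (pvSplitRef_ne_nil c xs)
        | cons h t => exact ⟨h, t, rfl⟩
      have hsr : pvSplitRef c (x :: xs) = (x :: h) :: t := by
        simp [pvSplitRef, hx, hs]
      rw [hsr]
      simp only [pvNth, if_neg hx]
      rw [← ih n hn, hs]
      have hdrop : ((x :: h) :: t).drop n = (h :: t).drop n := by
        cases n with
        | zero => omega
        | succ m => simp
      rw [hdrop]
      simp

theorem pvGo_eq (c : Char) : ∀ (fuel : Nat) (l cur : List Char) (acc : List (List Char)),
    l.length < fuel →
    PySem.Chars.splitOn.go [c] fuel l cur acc =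
      acc.reverse ++ (match pvSplitRef c l with
        | [] => []
        | h :: t => (cur.reverse ++ h) :: t) := by
  intro fuel
  induction fuel with
  | zero => intro l cur acc h; omega
  | succ fuel ih =>
    intro l cur acc h
    cases l with
    | nil => simp [PySem.Chars.splitOn.go, pvSplitRef]
    | cons x rest =>
      simp only [PySem.Chars.splitOn.go]
      have hpre : [c].isPrefixOf (x :: rest) = (c == x) := by
        simp [List.isPrefixOf]
      simp only [List.length_cons] at h
      by_cases hx : c = x
      · rw [if_pos (by simp [hx])]
        rw [show (x :: rest).drop [c].length = rest by simp]
        rw [ih rest [] (cur.reverse :: acc) (by omega)]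
        obtain ⟨hh, tt, hs⟩ : ∃ hh tt, pvSplitRef c rest = hh :: tt := by
          cases hs : pvSplitRef c rest with
          | nil => exact absurd hs (pvSplitRef_ne_nil c rest)
          | cons hh tt => exact ⟨hh, tt, rfl⟩
        have hsr : pvSplitRef c (x :: rest) = [] :: hh :: tt := by
          simp [pvSplitRef, ← hx, hs]
        rw [hs, hsr]
        simp
      · rw [if_neg (by simp [hpre]; exact fun hh => hx hh)]
        rw [ih rest (x :: cur) acc (by omega)]
        obtain ⟨hh, tt, hs⟩ : ∃ hh tt, pvSplitRef c rest = hh :: tt := by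
          cases hs : pvSplitRef c rest with
          | nil => exact absurd hs (pvSplitRef_ne_nil c rest)
          | cons hh tt => exact ⟨hh, tt, rfl⟩
        have hsr : pvSplitRef c (x :: rest) = (x :: hh) :: tt := by
          simp [pvSplitRef, hs]
          intro h'; exact absurd h'.symm hx
        rw [hs, hsr]
        simp

theorem pvSplitOn_single (c : Char) (s : List Char) :
    PySem.Chars.splitOn s [c] = pvSplitRef c s := by
  unfold PySem.Chars.splitOn
  rw [pvGo_eq c (s.length + 1) s [] [] (by omega)]
  cases hs : pvSplitRef c s with
  | nil => exact absurd hs (pvSplitRef_ne_nil c s)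
  | cons h t => simp

-- ===== VERDICT (by name: the statement is the Claim_ definition above) =====
theorem PrintStringSpecChar_spec : Claim_equal_PrintStringSpecChar := by
  intro str chr cnt _
  unfold Spec_PrintStringSpecChar PrintStringSpecChar PrintStringSpecChar_alt
  by_cases hg : PySem.Str.len chr ≠ 1 ∨ cnt < 1
  · rw [if_pos hg]
    rcases hg with hlen | hcnt
    · rw [pvAGo_none_of_len chr cnt str.toList (by simpa [PySem.Str.len] using hlen) 0]
      rfl
    · obtain hA := pvAGo_none_of_le chr cnt str.toList 0 (by omega)
      rw [hA]; rfl
  · rw [if_neg hg]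
    push Not at hg
    obtain ⟨hlen, hcnt⟩ := hg
    obtain ⟨c, hc⟩ : ∃ c, chr.toList = [c] := by
      apply List.length_eq_one_iff.mp
      have : ((chr.toList.length : Int)) = 1 := by simpa [PySem.Str.len] using hlen
      omega
    -- analyse split?
    have hsplit := PySem.Str.split?_map str chr
    rw [hc] at hsplit
    have hne : PySem.Chars.split? str.toList [c] = some (PySem.Chars.splitOn str.toList [c]) := by
      simp [PySem.Chars.split?]
    rw [hne, pvSplitOn_single] at hsplit
    cases hps : PySem.Str.split? str chr with
    | none => rw [hps] at hsplit; simp at hsplit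
    | some parts =>
      rw [hps] at hsplit
      simp only [Option.map_some, Option.some.injEq] at hsplit
      have hplen : parts.length = (pvSplitRef c str.toList).length := by
        rw [← hsplit]; simp
      have hA : pvAGo chr cnt str.toList 0 = pvNth c str.toList cnt.toNat :=
        pvAGo_eq_pvNth chr c cnt hc str.toList 0 cnt.toNat (by omega) (by omega)
      have hB := pvBcore_eq_pvNth c str.toList cnt.toNat (by omega)
      have hcast : ((cnt.toNat : Int)) = cnt := by omega
      simp only [hA, ← hB, hplen, hcast]
      by_cases hcond : ((pvSplitRef c str.toList).length : Int) - 1 < cnt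
      · rw [if_pos hcond, if_pos hcond]; rfl
      · rw [if_neg hcond, if_neg hcond]
        simp only [Option.map_some, Option.some.injEq]
        apply String.toList_inj.mp
        rw [PySem.Str.toList_join, hc, ← hsplit]
        simp [List.map_drop]
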